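-- pv_equiv track=rewrite | github.com/owhenrique/unb-software-engeneering | 2023.2/TEP/ATCODER2/B.py | solve
-- ===== SOURCE A (Python) =====
-- def solve(B):
--     if B == 1:
--         return 1
--
--     a, c = 1, B
--     while a < c:
--         d = a + (c - a) // 2
--         rst = 1
--         tmp = d
--         while tmp > 0:
--             if rst > B:
--                 break
--             rst *= d
--             tmp -= 1
--         if rst == B:
--             return d
--         elif rst < B:
--             a = d + 1
--         else:
--             c = d
--     return -1
-- ===== SOURCE B (Python) =====
-- def solve(B):
--     d = 1
--     while True:
--         p = d ** d
--         if p == B: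
--             return d
--         if p > B:
--             return -1
--         d += 1
-- ===== Notes on version B (the rewrite author's own statement) =====
-- stated objective: simpler
-- what changed: Replaces the binary search over the interval with its hand-rolled early-breaking power loop by a direct upward scan over candidate bases, comparing each base raised to itself with B and exiting as soon as the power reaches or exceeds B; the super-exponential growth of the power bounds the scan to a handful of iterations.
import Mathlib
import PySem

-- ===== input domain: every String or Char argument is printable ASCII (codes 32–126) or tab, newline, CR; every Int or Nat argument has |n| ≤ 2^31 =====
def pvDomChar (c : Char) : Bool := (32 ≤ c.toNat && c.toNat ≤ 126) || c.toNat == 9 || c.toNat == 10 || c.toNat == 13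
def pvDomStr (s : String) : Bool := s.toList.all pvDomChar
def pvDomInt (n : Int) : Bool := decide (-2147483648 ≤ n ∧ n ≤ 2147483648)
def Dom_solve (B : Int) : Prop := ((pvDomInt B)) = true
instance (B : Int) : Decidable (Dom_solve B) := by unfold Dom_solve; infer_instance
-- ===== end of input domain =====

-- B replaces A's binary search (with its early-breaking power loop) by a plain upward scan
-- d = 1, 2, … comparing d**d with B; objective: simpler.

-- ===== PORT A =====
-- inner 'while tmp > 0: if rst > B: break; rst *= d; tmp -= 1'
def powLoop (B d rst tmp : Int) : Int :=
  if h1 : 0 < tmp then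
    if h2 : B < rst then rst
    else powLoop B d (rst * d) (tmp - 1)
  else rst
termination_by tmp.toNat
decreasing_by omega

-- outer 'while a < c' loop of A
def bsLoop (B a c : Int) : Int :=
  if h : a < c then
    let d := a + PySem.Int.floordiv (c - a) 2
    let rst := powLoop B d 1 d
    if rst = B then d
    else if rst < B then bsLoop B (d + 1) c
    else bsLoop B a d
  else -1
termination_by (c - a).toNat
decreasing_by
  · have hf : PySem.Int.floordiv (c - a) 2 = (c - a) / 2 :=
      PySem.Int.floordiv_eq_ediv_of_pos (by omega)
    omega
  · have hf : PySem.Int.floordiv (c - a) 2 = (c - a) / 2 :=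
      PySem.Int.floordiv_eq_ediv_of_pos (by omega)
    omega

def solve (B : Int) : Int :=
  if B = 1 then 1 else bsLoop B 1 B

-- ===== PORT B =====
-- needed by scanLoop's termination proof
theorem le_pow_self_toNat (d : Int) : d ≤ d ^ d.toNat := by
  rcases le_or_gt d 0 with h | h
  · have h0 : d.toNat = 0 := by omega
    rw [h0, pow_zero]; omega
  · calc d = d ^ 1 := (pow_one d).symm
    _ ≤ d ^ d.toNat := pow_le_pow_right₀ h (by omega)

-- 'while True: p = d ** d; if p == B: return d; if p > B: return -1; d += 1'
def scanLoop (B d : Int) : Int :=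
  let p := d ^ d.toNat
  if h1 : p = B then d
  else if h2 : B < p then -1
  else scanLoop B (d + 1)
termination_by (B - d).toNat
decreasing_by
  have := le_pow_self_toNat d
  omega

def solve_alt (B : Int) : Int := scanLoop B 1

-- ===== PRECONDITION & SPEC =====
def Spec_solve (B : Int) (out : Int) : Prop := out = solve_alt B
instance (B : Int) (out : Int) : Decidable (Spec_solve B out) := by unfold Spec_solve; infer_instance

-- ===== CLAIM (what is proved, stated in full; the proofs are below) =====
def Claim_equal_solve : Prop := ∀ (B : Int), Dom_solve B → Spec_solve B (solve B)

-- ===== LEMMAS AND PROOFS =====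

-- strict monotonicity of d ↦ d^d on d ≥ 1
theorem pow_toNat_lt {d e : Int} (hd : 1 ≤ d) (h : d < e) : d ^ d.toNat < e ^ e.toNat := by
  have hdn : d = (d.toNat : Int) := by omega
  have hen : e = (e.toNat : Int) := by omega
  rw [hdn, hen]
  have hnat : d.toNat ^ d.toNat < e.toNat ^ e.toNat :=
    lt_of_le_of_lt (Nat.pow_le_pow_left (by omega) d.toNat)
      (Nat.pow_lt_pow_right (by omega) (by omega))
  exact_mod_cast hnat

-- the early-breaking power loop compares to B exactly like rst * d^tmp does
theorem powLoop_cmp (B d : Int) (hd : 1 ≤ d) :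
    ∀ (n : Nat) (tmp rst : Int), tmp.toNat = n → 1 ≤ rst →
      ((powLoop B d rst tmp = B ↔ rst * d ^ tmp.toNat = B) ∧
       (powLoop B d rst tmp < B ↔ rst * d ^ tmp.toNat < B)) := by
  intro n
  induction n with
  | zero =>
    intro tmp rst hn hr
    have htmp : ¬ 0 < tmp := by omega
    unfold powLoop
    rw [dif_neg htmp, hn, pow_zero, mul_one]
    exact ⟨Iff.rfl, Iff.rfl⟩
  | succ k ih =>
    intro tmp rst hn hr
    have htmp : 0 < tmp := by omega
    unfold powLoop
    rw [dif_pos htmp]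
    by_cases hb : B < rst
    · rw [dif_pos hb]
      have hp1 : (1:Int) ≤ d ^ tmp.toNat := one_le_pow₀ hd
      have hge : rst ≤ rst * d ^ tmp.toNat := le_mul_of_one_le_right (by omega) hp1
      constructor <;> constructor <;> intro h <;> omega
    · rw [dif_neg hb]
      have hr' : 1 ≤ rst * d := one_le_mul_of_one_le_of_one_le hr hd
      have := ih (tmp - 1) (rst * d) (by omega) hr'
      have hexp : tmp.toNat = (tmp - 1).toNat + 1 := by omega
      rw [hexp, pow_succ]
      have hre : rst * (d ^ (tmp - 1).toNat * d) = rst * d * d ^ (tmp - 1).toNat := by ring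
      rw [hre]
      exact this

-- binary search finds the (unique) witness when it exists
theorem bsLoop_found (B e : Int) (he : 1 ≤ e) (heq : e ^ e.toNat = B) :
    ∀ (n : Nat) (a c : Int), (c - a).toNat = n → 1 ≤ a → a ≤ e → e < c → bsLoop B a c = e := by
  intro n
  induction n using Nat.strong_induction_on with
  | _ n ih =>
    intro a c hn ha hae hec
    have hac : a < c := by omega
    unfold bsLoop
    rw [dif_pos hac]
    have hf : PySem.Int.floordiv (c - a) 2 = (c - a) / 2 :=
      PySem.Int.floordiv_eq_ediv_of_pos (by omega)
    set d : Int := a + PySem.Int.floordiv (c - a) 2 with hd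
    have hdb : a ≤ d ∧ d < c := by rw [hd, hf]; omega
    have hd1 : 1 ≤ d := by omega
    have hcmp := powLoop_cmp B d hd1 d.toNat d 1 rfl (by omega)
    rw [one_mul] at hcmp
    rcases lt_trichotomy d e with hlt | heqd | hgt
    · have hdd : d ^ d.toNat < B := heq ▸ pow_toNat_lt hd1 hlt
      have h1 : ¬ powLoop B d 1 d = B := by rw [hcmp.1]; omega
      have h2 : powLoop B d 1 d < B := hcmp.2.mpr hdd
      rw [if_neg h1, if_pos h2]
      exact ih (c - (d + 1)).toNat (by omega) (d + 1) c rfl (by omega) (by omega) hec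
    · subst heqd
      rw [if_pos (hcmp.1.mpr heq)]
    · have hdd : B < d ^ d.toNat := heq ▸ pow_toNat_lt he hgt
      have h1 : ¬ powLoop B d 1 d = B := by rw [hcmp.1]; omega
      have h2 : ¬ powLoop B d 1 d < B := by rw [hcmp.2]; omega
      rw [if_neg h1, if_neg h2]
      exact ih (d - a).toNat (by omega) a d rfl ha hae hgt

-- binary search returns -1 when no witness exists
theorem bsLoop_none (B : Int) (hno : ∀ k : Int, 1 ≤ k → k ^ k.toNat ≠ B) :
    ∀ (n : Nat) (a c : Int), (c - a).toNat = n → 1 ≤ a → bsLoop B a c = -1 := by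
  intro n
  induction n using Nat.strong_induction_on with
  | _ n ih =>
    intro a c hn ha
    unfold bsLoop
    by_cases hac : a < c
    · rw [dif_pos hac]
      have hf : PySem.Int.floordiv (c - a) 2 = (c - a) / 2 :=
        PySem.Int.floordiv_eq_ediv_of_pos (by omega)
      set d : Int := a + PySem.Int.floordiv (c - a) 2 with hd
      have hdb : a ≤ d ∧ d < c := by rw [hd, hf]; omega
      have hd1 : 1 ≤ d := by omega
      have hcmp := powLoop_cmp B d hd1 d.toNat d 1 rfl (by omega)
      rw [one_mul] at hcmp
      have h1 : ¬ powLoop B d 1 d = B := by rw [hcmp.1]; exact hno d hd1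
      rw [if_neg h1]
      by_cases h2 : powLoop B d 1 d < B
      · rw [if_pos h2]
        exact ih (c - (d + 1)).toNat (by omega) (d + 1) c rfl (by omega)
      · rw [if_neg h2]
        exact ih (d - a).toNat (by omega) a d rfl ha
    · rw [dif_neg hac]

-- the scan finds the witness when it exists
theorem scanLoop_found (B e : Int) (heq : e ^ e.toNat = B) :
    ∀ (n : Nat) (d : Int), (e - d).toNat = n → 1 ≤ d → d ≤ e → scanLoop B d = e := by
  intro n
  induction n with
  | zero =>
    intro d hn hd hde
    have : d = e := by omega
    subst this
    unfold scanLoop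
    rw [dif_pos heq]
  | succ k ih =>
    intro d hn hd hde
    have hlt : d < e := by omega
    have hdd : d ^ d.toNat < B := heq ▸ pow_toNat_lt hd hlt
    unfold scanLoop
    rw [dif_neg (by omega : ¬ d ^ d.toNat = B), dif_neg (by omega : ¬ B < d ^ d.toNat)]
    exact ih (d + 1) (by omega) (by omega) (by omega)

-- the scan returns -1 when no witness exists
theorem scanLoop_none (B : Int) (hno : ∀ k : Int, 1 ≤ k → k ^ k.toNat ≠ B) :
    ∀ (n : Nat) (d : Int), (B - d).toNat = n → 1 ≤ d → scanLoop B d = -1 := by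
  intro n
  induction n with
  | zero =>
    intro d hn hd
    have hself := le_pow_self_toNat d
    have hne := hno d hd
    unfold scanLoop
    rw [dif_neg hne, dif_pos (by omega : B < d ^ d.toNat)]
  | succ k ih =>
    intro d hn hd
    have hself := le_pow_self_toNat d
    have hne := hno d hd
    unfold scanLoop
    rw [dif_neg hne]
    by_cases h2 : B < d ^ d.toNat
    · rw [dif_pos h2]
    · rw [dif_neg h2]
      exact ih (d + 1) (by omega) (by omega)

-- ===== VERDICT (by name: the statement is the Claim_ definition above) =====
theorem solve_spec : Claim_equal_solve := by
  unfold Claim_equal_solve Spec_solve solve solve_alt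
  intro B _
  by_cases hB1 : B = 1
  · subst hB1
    rw [if_pos rfl]
    unfold scanLoop
    norm_num
  · rw [if_neg hB1]
    by_cases hex : ∃ k : Int, 1 ≤ k ∧ k ^ k.toNat = B
    · obtain ⟨e, he1, heB⟩ := hex
      have he2 : 2 ≤ e := by
        by_contra h
        have : e = 1 := by omega
        subst this
        simp at heB
        exact hB1 heB.symm
      have heB' : e < B := by
        have h2 : e ^ 2 ≤ e ^ e.toNat := pow_le_pow_right₀ (by omega) (by omega)
        nlinarith
      rw [bsLoop_found B e he1 heB (B - 1).toNat 1 B rfl (by omega) he1 heB',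
          scanLoop_found B e heB (e - 1).toNat 1 rfl (by omega) he1]
    · push Not at hex
      have hno : ∀ k : Int, 1 ≤ k → k ^ k.toNat ≠ B := fun k hk => hex k hk
      by_cases hB : 1 < B
      · rw [bsLoop_none B hno (B - 1).toNat 1 B rfl (by omega),
            scanLoop_none B hno (B - 1).toNat 1 rfl (by omega)]
      · have hBlt : B < 1 := by omega
        unfold bsLoop scanLoop
        rw [dif_neg (by omega : ¬ (1:Int) < B)]
        norm_num
        omega
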